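-- pv_equiv track=rewrite | github.com/0xff3232/pyleetcode | db/calculateMoneyInBank/solutions.py | solution2
-- ===== SOURCE A (Python) =====
-- def solution2(n):
--     week = n // 7
--     money = week * 28
--     money += (7 * week * (week - 1) // 2)
--
--     if (n % 7):
--         days_left = n%7
--         money_to_add = week + 1
--         for _ in range(days_left):
--             money += money_to_add
--             money_to_add += 1
--
--     return money
-- ===== SOURCE B (Python) =====
-- def solution2(n):
--     week, r = divmod(n, 7)
--     return week * 28 + 7 * week * (week - 1) // 2 + r * (week + 1) + r * (r - 1) // 2
-- ===== Notes on version B (the rewrite author's own statement) =====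
-- stated objective: simpler
-- what changed: Replaced the for-loop over the leftover days with the closed-form arithmetic-series sum r*(week+1)+r*(r-1)//2, so B is a single pure-arithmetic expression with no loop or branch.
import Mathlib
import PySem

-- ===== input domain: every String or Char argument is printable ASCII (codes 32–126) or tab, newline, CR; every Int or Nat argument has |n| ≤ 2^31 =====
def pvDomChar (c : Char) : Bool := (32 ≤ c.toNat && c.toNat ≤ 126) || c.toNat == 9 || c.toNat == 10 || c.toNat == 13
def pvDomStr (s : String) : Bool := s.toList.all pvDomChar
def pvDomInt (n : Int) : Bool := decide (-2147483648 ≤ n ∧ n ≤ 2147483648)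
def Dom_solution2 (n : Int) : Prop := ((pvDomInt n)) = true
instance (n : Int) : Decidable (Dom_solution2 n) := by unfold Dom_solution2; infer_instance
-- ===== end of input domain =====

-- B replaces A's loop over the leftover days with the closed-form arithmetic-series sum (simpler, no loop).

-- ===== PORT A =====
def solution2 (n : Int) : Int :=
  let week := PySem.Int.floordiv n 7
  let money := week * 28
  let money := money + PySem.Int.floordiv (7 * week * (week - 1)) 2
  if PySem.Int.mod n 7 ≠ 0 then
    let days_left := PySem.Int.mod n 7
    let money_to_add := week + 1
    let s := (PySem.List.pyRange 0 days_left 1).foldl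
      (fun (st : Int × Int) _ => (st.1 + st.2, st.2 + 1)) (money, money_to_add)
    s.1
  else
    money

-- ===== PORT B =====
def solution2_alt (n : Int) : Int :=
  let week := PySem.Int.floordiv n 7
  let r := PySem.Int.mod n 7
  week * 28 + PySem.Int.floordiv (7 * week * (week - 1)) 2
    + r * (week + 1) + PySem.Int.floordiv (r * (r - 1)) 2

-- ===== PRECONDITION & SPEC =====
def Spec_solution2 (n : Int) (out : Int) : Prop := out = solution2_alt n
instance (n : Int) (out : Int) : Decidable (Spec_solution2 n out) := by unfold Spec_solution2; infer_instance

-- ===== CLAIM (what is proved, stated in full; the proofs are below) =====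
def Claim_equal_solution2 : Prop := ∀ (n : Int), Dom_solution2 n → Spec_solution2 n (solution2 n)

-- ===== LEMMAS AND PROOFS =====

-- A's leftover-days loop computes exactly the arithmetic-series closed form, for any 0 ≤ r.
theorem pvLoop_closed (m w : Int) (k : Nat) :
    (PySem.List.pyRange 0 (k : Int) 1).foldl
      (fun (st : Int × Int) _ => (st.1 + st.2, st.2 + 1)) (m, w) =
    (m + (k : Int) * w + ((k * (k - 1) / 2 : Nat) : Int), w + (k : Int)) := by
  induction k with
  | zero => simp [PySem.List.pyRange_one_eq_nil]
  | succ k ih =>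
    rw [show ((k + 1 : Nat) : Int) = (k : Int) + 1 by push_cast; ring,
        PySem.List.pyRange_one_succ_right (by positivity), List.foldl_append, ih]
    simp only [List.foldl_cons, List.foldl_nil]
    have he : (k + 1) * k = k * (k - 1) + 2 * k := by
      cases k with
      | zero => simp
      | succ j => simp only [Nat.add_sub_cancel]; ring
    have h3 : ((k + 1) * k / 2 : Nat) = (k * (k - 1) / 2 : Nat) + k := by omega
    refine Prod.ext ?_ (by simp; ring)
    show m + (k:Int) * w + ((k * (k - 1) / 2 : Nat) : Int) + (w + (k:Int))
        = m + ((k:Int) + 1) * w + (((k+1) * k / 2 : Nat) : Int)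
    push_cast [h3]; ring

theorem pvTri_floordiv (k : Nat) :
    PySem.Int.floordiv ((k : Int) * ((k : Int) - 1)) 2 = ((k * (k - 1) / 2 : Nat) : Int) := by
  cases k with
  | zero => simp [PySem.Int.floordiv]
  | succ j =>
    rw [show ((j + 1 : Nat) : Int) * (((j + 1 : Nat) : Int) - 1) = (((j + 1) * j : Nat) : Int) by push_cast; ring,
        show (j + 1) * (j + 1 - 1) / 2 = (j + 1) * j / 2 by simp]
    exact_mod_cast PySem.Int.floordiv_natCast ((j + 1) * j) 2

-- ===== VERDICT (by name: the statement is the Claim_ definition above) =====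
theorem solution2_spec : Claim_equal_solution2 := by
  intro n _
  unfold Spec_solution2 solution2 solution2_alt
  have hm : PySem.Int.mod n 7 = n % 7 := PySem.Int.mod_eq_emod_of_pos (by norm_num)
  have hb : 0 ≤ n % 7 ∧ n % 7 < 7 := ⟨Int.emod_nonneg n (by norm_num), Int.emod_lt_of_pos n (by norm_num)⟩
  simp only [hm]
  by_cases h0 : n % 7 = 0
  · simp [h0, PySem.Int.floordiv]
  · simp only [h0, ne_eq, not_false_eq_true, if_pos]
    obtain ⟨k, hk⟩ : ∃ k : Nat, n % 7 = (k : Int) := ⟨(n % 7).toNat, (Int.toNat_of_nonneg hb.1).symm⟩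
    rw [hk, pvLoop_closed, pvTri_floordiv]
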